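-- pv_equiv track=rewrite | github.com/bakhaevaea/Python8 | Семинар 8.py | PrintData
-- ===== SOURCE A (Python) =====
-- def PrintData(num):
--     days = [31, 30, 31, 31, 30]
--     months = ["05", "06", "07", "08", "09"]
--     sum = 0
--     for i in range(len(days)):
--         sum += days[i]
--         if sum >= num + 1:
--             return str(days[i] - (sum - num - 1)) + "." + months[i]
-- ===== SOURCE B (Python) =====
-- def PrintData(num):
--     # Closed form: no loop, no accumulator.  The month is determined by
--     # comparing num against the precomputed cumulative boundaries of the
--     # summer months (31,61,92,123,153 days), and the day of month is num
--     # minus the start offset of that month, plus one.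
--     if num <= 30:
--         return str(num + 1) + ".05"
--     if num <= 60:
--         return str(num - 30) + ".06"
--     if num <= 91:
--         return str(num - 60) + ".07"
--     if num <= 122:
--         return str(num - 91) + ".08"
--     if num <= 152:
--         return str(num - 122) + ".09"
-- ===== Notes on version B (the rewrite author's own statement) =====
-- stated objective: simpler
-- what changed: B replaces A's loop with a growing cumulative sum by a loop-free closed form: a chain of comparisons against precomputed cumulative boundaries (30/60/91/122/152) returning the day as a direct offset.
import Mathlib
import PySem

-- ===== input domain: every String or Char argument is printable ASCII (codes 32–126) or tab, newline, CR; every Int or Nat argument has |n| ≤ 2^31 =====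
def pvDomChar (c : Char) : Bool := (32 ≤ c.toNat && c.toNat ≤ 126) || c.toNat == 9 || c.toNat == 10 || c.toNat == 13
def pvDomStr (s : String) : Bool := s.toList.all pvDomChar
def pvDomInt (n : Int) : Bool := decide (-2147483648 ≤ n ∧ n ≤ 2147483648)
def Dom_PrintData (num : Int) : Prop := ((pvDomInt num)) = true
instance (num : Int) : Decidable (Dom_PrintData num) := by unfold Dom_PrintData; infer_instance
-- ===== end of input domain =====

-- B replaces A's accumulator loop by a loop-free closed-form comparison chain (simpler decomposition; same result).
-- ===== PORT A =====
-- literal port of A: loop i over range(5), sum += days[i], return on sum >= num+1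
def pvDaysA : List Int := [31, 30, 31, 31, 30]
def pvMonthsA : List String := ["05", "06", "07", "08", "09"]
def pvLoopA (num : Int) : List Nat → Int → Option String
  | [], _ => none
  | i :: rest, sum =>
    let sum := sum + pvDaysA.getD i 0
    if sum ≥ num + 1 then
      some (PySem.Int.toStr (pvDaysA.getD i 0 - (sum - num - 1)) ++ "." ++ pvMonthsA.getD i "")
    else pvLoopA num rest sum

def PrintData (num : Int) : Option String := pvLoopA num [0, 1, 2, 3, 4] 0

-- ===== PORT B =====
-- literal port of B: no loop, comparison chain against precomputed cumulative boundaries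
def PrintData_alt (num : Int) : Option String :=
  if num ≤ 30 then some (PySem.Int.toStr (num + 1) ++ ".05")
  else if num ≤ 60 then some (PySem.Int.toStr (num - 30) ++ ".06")
  else if num ≤ 91 then some (PySem.Int.toStr (num - 60) ++ ".07")
  else if num ≤ 122 then some (PySem.Int.toStr (num - 91) ++ ".08")
  else if num ≤ 152 then some (PySem.Int.toStr (num - 122) ++ ".09")
  else none

-- ===== PRECONDITION & SPEC =====
def Spec_PrintData (num : Int) (out : Option String) : Prop := out = PrintData_alt num
instance (num : Int) (out : Option String) : Decidable (Spec_PrintData num out) := by unfold Spec_PrintData; infer_instance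

-- ===== CLAIM (what is proved, stated in full; the proofs are below) =====
def Claim_equal_PrintData : Prop := ∀ (num : Int), Dom_PrintData num → Spec_PrintData num (PrintData num)

-- ===== LEMMAS AND PROOFS =====
theorem pvSomeStr (x y : Int) (a b : String) (h : x = y) (hs : "." ++ a = b) :
    some (PySem.Int.toStr x ++ "." ++ a) = some (PySem.Int.toStr y ++ b) := by
  subst h; rw [← hs, String.append_assoc]

-- ===== VERDICT (by name: the statement is the Claim_ definition above) =====
theorem PrintData_spec : Claim_equal_PrintData := by
  intro num _
  unfold Spec_PrintData PrintData PrintData_alt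
  simp only [pvLoopA, pvDaysA, pvMonthsA, List.getD]
  norm_num
  split_ifs <;> first
    | rfl
    | omega
    | exact pvSomeStr _ _ _ _ (by omega) (by decide)
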